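-- pv_equiv track=rewrite | github.com/RanbirAulakh/Automated-Detection-of-Vulnerabilities | Attacks/Fuzz.py | return_path_last_directory
-- ===== SOURCE A (Python) =====
-- def return_path_last_directory(url):
--     """
--     Returns path last directory
--     :param url: website URL
--     :return: path last directory
--     """
--     if url:
--         length = url.count('/')
--         if  length > 0:
--             directory = ""
--             count = 0
--             for char in url:
--                 directory+=char
--                 if char=="/":
--                     count+=1
--
--                 if count==length:
--                     break
--
--             return directory
-- ===== SOURCE B (Python) =====
-- def return_path_last_directory(url):
--     if url:
--         idx = url.rfind('/')
--         if idx >= 0: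
--             return url[:idx + 1]
-- ===== Notes on version B (the rewrite author's own statement) =====
-- stated objective: simpler
-- what changed: Replaces A's slash-counting pass plus char-by-char accumulation loop with a single reverse-find of the last slash and one slice.
import Mathlib
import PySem

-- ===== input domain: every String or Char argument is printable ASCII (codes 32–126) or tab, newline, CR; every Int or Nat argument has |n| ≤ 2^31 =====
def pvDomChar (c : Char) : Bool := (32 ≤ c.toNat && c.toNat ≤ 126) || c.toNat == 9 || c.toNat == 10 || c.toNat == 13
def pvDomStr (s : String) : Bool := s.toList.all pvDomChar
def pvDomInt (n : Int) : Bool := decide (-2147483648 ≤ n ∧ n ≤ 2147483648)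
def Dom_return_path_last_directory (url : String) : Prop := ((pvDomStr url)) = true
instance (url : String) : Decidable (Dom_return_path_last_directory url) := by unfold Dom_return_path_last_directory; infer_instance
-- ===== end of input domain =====

-- B replaces A's slash-counting pass plus accumulation loop with one reverse-find and a slice (simpler).

-- ===== PORT A =====
-- the for-loop of A over url's characters: acc = directory, count/length as in A;
-- strings are handled as List Char (exact: Python str iteration is by code point)
def pvGoA : List Char → Nat → Nat → List Char → List Char
  | [], _, _, acc => acc
  | c :: cs, length, count, acc =>
    let acc' := acc ++ [c]
    let count' := if c = '/' then count + 1 else count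
    if count' = length then acc' else pvGoA cs length count' acc'

def return_path_last_directory (url : String) : Option String :=
  if url ≠ "" then
    let length := url.toList.count '/'   -- url.count('/'); exact for a single-char needle
    if length > 0 then
      some (String.ofList (pvGoA url.toList length 0 []))
    else none
  else none

-- ===== PORT B =====
-- hand port of the builtin url.rfind('/') (exact for a single-char needle):
-- some i = highest index holding '/', none = -1
def pvRfindSlash : List Char → Option Nat
  | [] => none
  | c :: cs =>
    match pvRfindSlash cs with
    | some i => some (i + 1)
    | none => if c = '/' then some 0 else none

def return_path_last_directory_alt (url : String) : Option String :=
  if url ≠ "" then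
    match pvRfindSlash url.toList with
    | some i => some (String.ofList (url.toList.take (i + 1)))  -- url[:idx+1], idx ≥ 0: slice = take
    | none => none
  else none

-- ===== PRECONDITION & SPEC =====
def Spec_return_path_last_directory (url : String) (out : Option String) : Prop := out = return_path_last_directory_alt url
instance (url : String) (out : Option String) : Decidable (Spec_return_path_last_directory url out) := by unfold Spec_return_path_last_directory; infer_instance

-- ===== CLAIM (what is proved, stated in full; the proofs are below) =====
def Claim_equal_return_path_last_directory : Prop := ∀ (url : String), Dom_return_path_last_directory url → Spec_return_path_last_directory url (return_path_last_directory url)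

-- ===== LEMMAS AND PROOFS =====

theorem pvRfindSlash_none_iff (cs : List Char) : pvRfindSlash cs = none ↔ cs.count '/' = 0 := by
  induction cs with
  | nil => simp [pvRfindSlash]
  | cons c cs ih =>
    cases h : pvRfindSlash cs with
    | some j =>
      have hip : cs.count '/' ≠ 0 := fun hz => by simp [ih.mpr hz] at h
      simp [pvRfindSlash, h, List.count_cons]
      exact fun hzz => absurd hzz hip
    | none =>
      have hz : cs.count '/' = 0 := ih.mp h
      by_cases hc : c = '/' <;> simp [pvRfindSlash, h, hc, hz]

theorem pvGoA_eq_take (cs : List Char) : ∀ (i count : Nat) (acc : List Char),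
    pvRfindSlash cs = some i →
    pvGoA cs (count + cs.count '/') count acc = acc ++ cs.take (i + 1) := by
  induction cs with
  | nil => intro i count acc h; simp [pvRfindSlash] at h
  | cons c cs ih =>
    intro i count acc h
    simp only [pvRfindSlash] at h
    cases hr : pvRfindSlash cs with
    | some j =>
      rw [hr] at h
      have hi : i = j + 1 := by simpa using h.symm
      have hpos : cs.count '/' > 0 := by
        by_contra hz
        have : pvRfindSlash cs = none := (pvRfindSlash_none_iff cs).mpr (by omega)
        simp [this] at hr
      by_cases hc : c = '/'
      · subst hc
        simp only [pvGoA, List.count_cons_self, if_true]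
        have hne : count + 1 ≠ count + (cs.count '/' + 1) := by omega
        rw [if_neg hne]
        have key := ih j (count + 1) (acc ++ ['/']) hr
        have harith : count + 1 + cs.count '/' = count + (cs.count '/' + 1) := by omega
        rw [harith] at key
        rw [key, hi]
        simp [List.take_succ_cons]
      · simp only [pvGoA, if_neg hc, List.count_cons_of_ne hc]
        have hne : count ≠ count + cs.count '/' := by omega
        rw [if_neg hne]
        rw [ih j count (acc ++ [c]) hr, hi]
        simp [List.take_succ_cons]
    | none =>
      rw [hr] at h
      have hz : cs.count '/' = 0 := (pvRfindSlash_none_iff cs).mp hr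
      by_cases hc : c = '/'
      · subst hc
        rw [if_pos rfl] at h
        have hi : i = 0 := by simpa using h.symm
        simp only [pvGoA, List.count_cons_self, hz, if_true]
        rw [hi]
        simp
      · rw [if_neg hc] at h
        exact absurd h (by simp)

-- ===== VERDICT (by name: the statement is the Claim_ definition above) =====
theorem return_path_last_directory_spec : Claim_equal_return_path_last_directory := by
  intro url _
  unfold Spec_return_path_last_directory return_path_last_directory return_path_last_directory_alt
  by_cases hne : url = ""
  · simp [hne]
  · cases hr : pvRfindSlash url.toList with
    | none =>
      have hz : url.toList.count '/' = 0 := (pvRfindSlash_none_iff url.toList).mp hr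
      simp [hne, hz]
    | some i =>
      have hpos : url.toList.count '/' > 0 := by
        by_contra hzn
        have : pvRfindSlash url.toList = none := (pvRfindSlash_none_iff url.toList).mpr (by omega)
        simp [this] at hr
      have key := pvGoA_eq_take url.toList i 0 [] hr
      simp only [Nat.zero_add] at key
      simp [hne, hpos, key]
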